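-- pv_equiv track=rewrite | github.com/joe-siyuan-qiao/ViP-DeepLab | cityscapes-dvps/eval_dvpq.py | load_sequence
-- ===== SOURCE A (Python) =====
-- def load_sequence(inp_lst):
--     out_dict = dict()
--     for inp in inp_lst:
--         seq_id = inp.split('_')[0]
--         if seq_id not in out_dict:
--             out_dict[seq_id] = []
--         out_dict[seq_id].append(inp)
--     for seq_id in out_dict:
--         out_dict[seq_id] = sorted(out_dict[seq_id])
--     return out_dict
-- ===== SOURCE B (Python) =====
-- def load_sequence(inp_lst):
--     # Seed keys in first-occurrence order, then one pass over the globally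
--     # sorted list: each group receives its elements already in sorted order,
--     # so no per-group sorting loop is needed.
--     out_dict = {inp.split('_')[0]: [] for inp in inp_lst}
--     for inp in sorted(inp_lst):
--         out_dict[inp.split('_')[0]].append(inp)
--     return out_dict
-- ===== Notes on version B (the rewrite author's own statement) =====
-- stated objective: simpler
-- what changed: B seeds the keys with a dict comprehension and then fills the groups in one pass over the globally sorted input, so the per-group sorting loop of A disappears.
import Mathlib
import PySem

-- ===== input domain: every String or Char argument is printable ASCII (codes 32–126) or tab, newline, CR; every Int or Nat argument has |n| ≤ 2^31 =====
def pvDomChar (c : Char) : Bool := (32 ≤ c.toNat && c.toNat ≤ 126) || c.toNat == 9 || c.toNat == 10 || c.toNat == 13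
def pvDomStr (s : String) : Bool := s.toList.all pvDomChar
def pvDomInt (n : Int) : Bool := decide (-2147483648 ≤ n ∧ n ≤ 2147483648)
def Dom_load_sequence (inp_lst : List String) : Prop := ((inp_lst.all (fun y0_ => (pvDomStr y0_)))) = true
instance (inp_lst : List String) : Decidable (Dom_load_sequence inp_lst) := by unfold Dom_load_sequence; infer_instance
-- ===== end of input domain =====

-- B changes the decomposition: keys are seeded first, then one pass over the globally
-- sorted input fills the groups, so A's per-group sorting loop disappears (objective: simpler).

-- inp.split('_')[0]: split with a nonempty separator never returns an empty list, so [0] is its head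
def pvSeqId (s : String) : String := ((PySem.Str.split? s "_").getD []).headD ""

-- ===== PORT A =====
def load_sequence (inp_lst : List String) : List (String × List String) :=
  let out_dict : PySem.Dict String (List String) :=
    inp_lst.foldl (fun d inp =>
      let seq_id := pvSeqId inp
      -- 'if seq_id not in out_dict: out_dict[seq_id] = []'
      let d := if d.contains seq_id then d else d.insert seq_id []
      -- 'out_dict[seq_id].append(inp)'
      d.modify seq_id [] (fun l => l ++ [inp])) PySem.Dict.empty
  -- 'for seq_id in out_dict: out_dict[seq_id] = sorted(out_dict[seq_id])':
  -- reassigning every key to a function of its own value, in key order = map over the items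
  (out_dict.items.map (fun p => (p.1, PySem.List.sorted p.2 (fun x => x) false)))

-- ===== PORT B =====
def load_sequence_alt (inp_lst : List String) : List (String × List String) :=
  -- '{inp.split('_')[0]: [] for inp in inp_lst}'
  let out_dict : PySem.Dict String (List String) :=
    inp_lst.foldl (fun d inp => d.insert (pvSeqId inp) []) PySem.Dict.empty
  -- 'for inp in sorted(inp_lst): out_dict[inp.split('_')[0]].append(inp)'
  -- (the key is always present, so modify with default [] is d[k].append(inp) exactly)
  let out_dict :=
    (PySem.List.sorted inp_lst (fun x => x) false).foldl
      (fun d inp => d.modify (pvSeqId inp) [] (fun l => l ++ [inp])) out_dict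
  out_dict.items

-- ===== PRECONDITION & SPEC =====
def Spec_load_sequence (inp_lst : List String) (out : List (String × List String)) : Prop := out = load_sequence_alt inp_lst
instance (inp_lst : List String) (out : List (String × List String)) : Decidable (Spec_load_sequence inp_lst out) := by unfold Spec_load_sequence; infer_instance

-- ===== CLAIM (what is proved, stated in full; the proofs are below) =====
def Claim_equal_load_sequence : Prop := ∀ (inp_lst : List String), Dom_load_sequence inp_lst → Spec_load_sequence inp_lst (load_sequence inp_lst)

-- ===== LEMMAS AND PROOFS =====

-- A's loop body collapses: 'setdefault then append' is exactly modify-with-default-[]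
theorem stepA_eq_modify (d : PySem.Dict String (List String)) (inp : String) :
    (if d.contains (pvSeqId inp) then d else d.insert (pvSeqId inp) []).modify
        (pvSeqId inp) [] (fun l => l ++ [inp])
    = d.modify (pvSeqId inp) [] (fun l => l ++ [inp]) := by
  by_cases h : d.contains (pvSeqId inp)
  · simp [h]
  · simp only [Bool.not_eq_true] at h
    simp [h, PySem.Dict.modify, PySem.Dict.insert_insert_self,
      PySem.Dict.getD_insert_self, PySem.Dict.getD_of_not_contains (d := d) (h := h)]

-- the filling loop, read off at one key
theorem getD_fill (xs : List String) (d : PySem.Dict String (List String)) (c : String) :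
    (xs.foldl (fun d inp => d.modify (pvSeqId inp) [] (fun l => l ++ [inp])) d).getD c []
    = d.getD c [] ++ xs.filter (fun s => pvSeqId s == c) := by
  have h : xs.foldl (fun d inp => d.modify (pvSeqId inp) [] (fun l => l ++ [inp])) d
      = (xs.map (fun s => (pvSeqId s, s))).foldl
          (fun d p => d.modify p.1 [] (fun l => l ++ [p.2])) d := by
    simp [List.foldl_map]
  rw [h, PySem.Dict.getD_foldl_modify_append]
  simp [List.filter_map, Function.comp_def]

-- the seeding loop puts [] at every key
theorem getD_seed (xs : List String) (d : PySem.Dict String (List String)) (c : String)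
    (h : d.getD c [] = []) :
    (xs.foldl (fun d inp => d.insert (pvSeqId inp) []) d).getD c [] = [] := by
  induction xs generalizing d with
  | nil => simpa
  | cons x t ih =>
      refine ih _ ?_
      rw [PySem.Dict.getD_insert]
      split <;> [rfl; exact h]

-- updating a set with elements it already has changes nothing
theorem update_of_subset (s : PySem.Set String) (l : List String)
    (h : ∀ y ∈ l, y ∈ s) : s.update l = s := by
  rw [PySem.Set.update_eq_append_filter]
  have hf : (PySem.Set.ofList l).filter (fun y => !s.contains y) = [] := by
    rw [List.filter_eq_nil_iff]
    intro y hy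
    have hm : y ∈ s := h y ((PySem.Set.mem_ofList l y).1 hy)
    simp only [Bool.not_eq_true', Bool.not_eq_false]
    exact (PySem.Set.contains_iff s y).2 hm
  rw [hf, List.append_nil]

-- filtering commutes with sorting (key = identity)
theorem sorted_filter (xs : List String) (p : String → Bool) :
    PySem.List.sorted (xs.filter p) (fun x => x) false
    = (PySem.List.sorted xs (fun x => x) false).filter p := by
  apply PySem.List.sorted_id_eq_of_perm_of_pairwise
  · exact (PySem.List.sorted_perm xs _ false).filter p
  · exact (PySem.List.sorted_pairwise xs _).filter p

-- ===== VERDICT (by name: the statement is the Claim_ definition above) =====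
theorem load_sequence_spec : Claim_equal_load_sequence := by
  unfold Claim_equal_load_sequence
  intro xs _
  unfold Spec_load_sequence load_sequence load_sequence_alt
  simp only []
  set K : List String := PySem.Set.ofList (xs.map pvSeqId) with hK
  -- A side
  have hfun : (fun (d : PySem.Dict String (List String)) inp =>
      (if d.contains (pvSeqId inp) then d else d.insert (pvSeqId inp) []).modify
        (pvSeqId inp) [] (fun l => l ++ [inp]))
      = (fun d inp => d.modify (pvSeqId inp) [] (fun l => l ++ [inp])) := by
    funext d inp; exact stepA_eq_modify d inp
  set dA := xs.foldl (fun d inp => d.modify (pvSeqId inp) [] (fun l => l ++ [inp]))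
      PySem.Dict.empty with hdA
  have hAkeys : dA.keys = K := by
    rw [hdA, PySem.Dict.keys_foldl_modify_key xs pvSeqId [] (fun _ inp l => l ++ [inp])]
    exact PySem.Set.update_nil_left _
  have hAnodup : dA.keys.Nodup := by rw [hdA]; exact
    PySem.Dict.nodup_keys_foldl_modify_key _ _ _ _ _ PySem.Dict.nodup_keys_empty
  have hAget : ∀ c, dA.getD c [] = xs.filter (fun s => pvSeqId s == c) := by
    intro c; rw [hdA, getD_fill]; simp
  -- B side
  set d0 := xs.foldl (fun d inp => d.insert (pvSeqId inp) []) PySem.Dict.empty with hd0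
  set dB := (PySem.List.sorted xs (fun x => x) false).foldl
      (fun d inp => d.modify (pvSeqId inp) [] (fun l => l ++ [inp])) d0 with hdB
  have h0keys : d0.keys = K := by
    rw [hd0, PySem.Dict.keys_foldl_insert_key xs pvSeqId (fun _ _ => [])]
    exact PySem.Set.update_nil_left _
  have hBkeys : dB.keys = K := by
    rw [hdB, PySem.Dict.keys_foldl_modify_key _ pvSeqId [] (fun _ inp l => l ++ [inp]),
      h0keys]
    apply update_of_subset
    intro y hy
    rcases List.mem_map.1 hy with ⟨s, hs, rfl⟩
    have hsx : s ∈ xs := ((PySem.List.sorted_perm xs _ false).mem_iff).1 hs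
    exact (PySem.Set.mem_ofList _ _).2 (List.mem_map_of_mem hsx)
  have hBnodup : dB.keys.Nodup := by
    rw [hdB]
    refine PySem.Dict.nodup_keys_foldl_modify_key _ _ _ _ _ ?_
    rw [hd0]
    exact PySem.Dict.nodup_keys_foldl_insert_key _ _ _ _ PySem.Dict.nodup_keys_empty
  have hBget : ∀ c, dB.getD c []
      = (PySem.List.sorted xs (fun x => x) false).filter (fun s => pvSeqId s == c) := by
    intro c
    rw [hdB, getD_fill]
    rw [getD_seed xs PySem.Dict.empty c (by simp [PySem.Dict.getD_empty])]
    simp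
  -- put both sides in map-over-K form and compare pointwise
  rw [hfun, ← hdA, PySem.Dict.items_eq_map_keys dA hAnodup [],
    PySem.Dict.items_eq_map_keys dB hBnodup [], hAkeys, hBkeys, List.map_map]
  refine List.map_congr_left ?_
  intro c _
  simp only [Function.comp_apply, hAget c, hBget c, sorted_filter]
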